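-- pv_equiv track=rewrite | github.com/JiminiiiKim/Programmers | Python/[프로그래머스] 더 맵게.py | solution
-- ===== SOURCE A (Python) =====
-- import heapq
--
-- def solution(S, K) :
--     heap = []
--     for i in S :
--         heapq.heappush(heap, i)
--
--     answer = 0
--     while heap[0] < K :
--         if len(heap) == 1 : return -1
--
--         heapq.heappush(heap, heapq.heappop(heap) + heapq.heappop(heap) * 2)
--         answer += 1
--
--     return answer
-- ===== SOURCE B (Python) =====
-- def solution(S, K):
--     foods = list(S)
--     answer = 0
--     while min(foods) < K:
--         if len(foods) == 1:
--             return -1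
--         a = min(foods)
--         foods.remove(a)
--         b = min(foods)
--         foods.remove(b)
--         foods.append(a + 2 * b)
--         answer += 1
--     return answer
-- ===== Notes on version B (the rewrite author's own statement) =====
-- stated objective: alternative
-- what changed: Replaces the binary heap with a plain list on which each round's two smallest scovilles are found by linear min scans and removed, so no heap structure is maintained.
import Mathlib
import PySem

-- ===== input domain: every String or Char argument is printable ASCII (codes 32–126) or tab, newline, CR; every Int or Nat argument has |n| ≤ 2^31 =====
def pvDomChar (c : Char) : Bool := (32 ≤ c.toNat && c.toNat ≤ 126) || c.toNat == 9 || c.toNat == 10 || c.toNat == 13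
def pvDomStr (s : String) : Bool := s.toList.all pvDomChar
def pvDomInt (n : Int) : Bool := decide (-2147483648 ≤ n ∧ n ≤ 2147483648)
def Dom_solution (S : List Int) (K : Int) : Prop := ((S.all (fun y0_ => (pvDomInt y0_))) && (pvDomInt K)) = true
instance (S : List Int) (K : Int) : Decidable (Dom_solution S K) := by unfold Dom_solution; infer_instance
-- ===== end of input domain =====

-- B replaces A's heap with plain linear min scans on a list (alternative decomposition);
-- equivalence is about the return value only (A mutates no argument; both build fresh lists).

-- ===== PORT A =====
-- heapq is modeled exactly as a sorted list: A only ever observes heap[0], len(heap) and the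
-- VALUES returned by heappop (always a minimum), and the elements are Ints, so the sorted-list
-- model returns exactly the values CPython's heapq returns on every input.
def hpush (x : Int) : List Int → List Int
  | [] => [x]
  | y :: ys => if x < y then x :: y :: ys else y :: hpush x ys

-- the 'while heap[0] < K' loop; fuel = len(heap) suffices since each round shrinks the heap by 1
def solnLoopA : Nat → List Int → Int → Int → Int
  | 0, _, _, ans => ans
  | _ + 1, [], _, ans => ans            -- heap[0] on empty heap raises: unreachable under Pre_
  | fuel + 1, h0 :: t, K, ans =>
    if h0 < K then
      if (h0 :: t).length == 1 then -1
      else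
        match t with
        | [] => ans                     -- unreachable: length ≥ 2 in this branch
        | b :: rest => solnLoopA fuel (hpush (h0 + b * 2) rest) K (ans + 1)
    else ans

def solution (S : List Int) (K : Int) : Int :=
  let heap := S.foldl (fun h i => hpush i h) []
  solnLoopA heap.length heap K 0

-- ===== PORT B =====
-- the 'while min(foods) < K' loop; fuel = len(foods) suffices since each round removes one element
def solnLoopB : Nat → List Int → Int → Int → Int
  | 0, _, _, answer => answer
  | fuel + 1, foods, K, answer =>
    match PySem.List.min? foods (fun x => x) with
    | none => answer                    -- min([]) raises: unreachable under Pre_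
    | some a =>
      if a < K then
        if foods.length == 1 then -1
        else
          match PySem.List.remove? foods a with
          | none => answer              -- unreachable: a ∈ foods
          | some f1 =>
            match PySem.List.min? f1 (fun x => x) with
            | none => answer            -- unreachable: len ≥ 1 here
            | some b =>
              match PySem.List.remove? f1 b with
              | none => answer          -- unreachable: b ∈ f1
              | some f2 => solnLoopB fuel (f2 ++ [a + 2 * b]) K (answer + 1)
      else answer

def solution_alt (S : List Int) (K : Int) : Int :=
  let foods := S
  solnLoopB foods.length foods K 0

-- ===== PRECONDITION & SPEC =====
-- Pre_ excludes only the empty list, on which A raises IndexError (heap[0]) and B raises ValueError (min([])).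
def Pre_solution (S : List Int) (K : Int) : Prop := S ≠ []
instance (S : List Int) (K : Int) : Decidable (Pre_solution S K) := by unfold Pre_solution; infer_instance
def pvWitness_solution : List Int × Int := ([1, 2, 3, 9, 10, 12], 7)

def Spec_solution (S : List Int) (K : Int) (out : Int) : Prop := out = solution_alt S K
instance (S : List Int) (K : Int) (out : Int) : Decidable (Spec_solution S K out) := by unfold Spec_solution; infer_instance

-- ===== CLAIM (what is proved, stated in full; the proofs are below) =====
def Claim_equal_solution : Prop := ∀ (S : List Int) (K : Int), Dom_solution S K → Pre_solution S K → Spec_solution S K (solution S K)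

-- ===== LEMMAS AND PROOFS =====

theorem hpush_perm (x : Int) (l : List Int) : (hpush x l).Perm (x :: l) := by
  induction l with
  | nil => simp [hpush]
  | cons y ys ih =>
    simp only [hpush]
    split
    · exact List.Perm.refl _
    · exact (ih.cons y).trans (List.Perm.swap x y ys)

theorem hpush_sorted (x : Int) (l : List Int) (h : l.Pairwise (· ≤ ·)) :
    (hpush x l).Pairwise (· ≤ ·) := by
  induction l with
  | nil => simp [hpush]
  | cons y ys ih =>
    rcases List.pairwise_cons.mp h with ⟨hy, hys⟩
    simp only [hpush]
    split
    · rename_i hlt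
      refine List.pairwise_cons.mpr ⟨?_, h⟩
      intro z hz
      rcases List.mem_cons.mp hz with rfl | hz
      · exact le_of_lt hlt
      · exact (le_of_lt hlt).trans (hy z hz)
    · rename_i hnlt
      refine List.pairwise_cons.mpr ⟨?_, ih hys⟩
      intro z hz
      rcases List.mem_cons.mp ((hpush_perm x ys).mem_iff.mp hz) with rfl | hz
      · exact le_of_not_gt hnlt
      · exact hy z hz

theorem cons_perm_append_singleton (a : Int) (l : List Int) :
    (a :: l).Perm (l ++ [a]) := by
  simpa using (List.perm_middle (l₁ := l) (l₂ := ([] : List Int)) (a := a)).symm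

theorem min?_of_sorted_perm (h0 : Int) (t f : List Int)
    (hs : (h0 :: t).Pairwise (· ≤ ·)) (hp : (h0 :: t).Perm f) :
    PySem.List.min? f (fun x => x) = some h0 := by
  cases hmin : PySem.List.min? f (fun x => x) with
  | none =>
    have hf : f = [] := (PySem.List.min?_eq_none_iff f (fun x => x)).mp hmin
    subst hf
    exact absurd hp.eq_nil (by simp)
  | some m =>
    have hmem : m ∈ h0 :: t := hp.mem_iff.mpr (PySem.List.min?_mem hmin)
    have h1 : h0 ≤ m := by
      rcases List.mem_cons.mp hmem with rfl | hm
      · exact le_refl _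
      · exact List.rel_of_pairwise_cons hs hm
    have h2 : m ≤ h0 :=
      PySem.List.min?_isMin hmin h0 (hp.subset (List.mem_cons_self))
    rw [le_antisymm h2 h1]

theorem loop_eq (fuel : Nat) : ∀ (heap foods : List Int) (K ans : Int),
    heap.Pairwise (· ≤ ·) → heap.Perm foods →
    solnLoopA fuel heap K ans = solnLoopB fuel foods K ans := by
  induction fuel with
  | zero => intro heap foods K ans _ _; rfl
  | succ fuel ih =>
    intro heap foods K ans hs hp
    cases heap with
    | nil =>
      have : foods = [] := hp.symm.eq_nil
      subst this
      simp [solnLoopA, solnLoopB, PySem.List.min?]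
    | cons h0 t =>
      have hmin : PySem.List.min? foods (fun x => x) = some h0 :=
        min?_of_sorted_perm h0 t foods hs hp
      have hlen : foods.length = t.length + 1 := by
        simpa using hp.length_eq.symm
      simp only [solnLoopA, solnLoopB, hmin]
      by_cases hK : h0 < K
      · rw [if_pos hK, if_pos hK]
        cases t with
        | nil => simp [hlen]
        | cons b rest =>
          have hb1 : (rest.length + 1 + 1 == 1) = false := by simp
          have hb2 : (foods.length == 1) = false := by simp [hlen]
          have hmem0 : h0 ∈ foods := hp.subset List.mem_cons_self
          have hp1 : (b :: rest).Perm (foods.erase h0) := by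
            have := hp.erase h0
            simpa using this
          have hs1 : (b :: rest).Pairwise (· ≤ ·) := (List.pairwise_cons.mp hs).2
          have hminb : PySem.List.min? (foods.erase h0) (fun x => x) = some b :=
            min?_of_sorted_perm b rest (foods.erase h0) hs1 hp1
          have hmemb : b ∈ foods.erase h0 := hp1.subset List.mem_cons_self
          have hp2 : rest.Perm ((foods.erase h0).erase b) := by
            have := hp1.erase b
            simpa using this
          simp only [List.length_cons, hb1, hb2,
            PySem.List.remove?_eq_some_erase foods h0 hmem0, hminb,
            PySem.List.remove?_eq_some_erase (foods.erase h0) b hmemb,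
            Bool.false_eq_true, if_false]
          apply ih
          · exact hpush_sorted _ _ (List.pairwise_cons.mp hs1).2
          · have hmul : h0 + b * 2 = h0 + 2 * b := by ring
            rw [hmul]
            exact (hpush_perm _ _).trans
              ((hp2.cons (h0 + 2 * b)).trans (cons_perm_append_singleton _ _))
      · rw [if_neg hK, if_neg hK]

theorem build_sorted_perm (S : List Int) : ∀ (acc : List Int), acc.Pairwise (· ≤ ·) →
    (S.foldl (fun h i => hpush i h) acc).Pairwise (· ≤ ·) ∧
    (S.foldl (fun h i => hpush i h) acc).Perm (acc ++ S) := by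
  induction S with
  | nil => intro acc hacc; simpa using hacc
  | cons x xs ih =>
    intro acc hacc
    simp only [List.foldl_cons]
    rcases ih (hpush x acc) (hpush_sorted x acc hacc) with ⟨hsrt, hprm⟩
    refine ⟨hsrt, hprm.trans ?_⟩
    exact ((hpush_perm x acc).append_right xs).trans List.perm_middle.symm

-- ===== VERDICT (by name: the statement is the Claim_ definition above) =====
theorem solution_spec : Claim_equal_solution := by
  intro S K _hdom _hpre
  rcases build_sorted_perm S [] (by simp) with ⟨hsrt, hprm⟩
  simp only [List.nil_append] at hprm
  show solnLoopA (S.foldl (fun h i => hpush i h) []).length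
      (S.foldl (fun h i => hpush i h) []) K 0 = solnLoopB S.length S K 0
  rw [hprm.length_eq]
  exact loop_eq S.length _ S K 0 hsrt hprm
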